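-- pv_equiv track=rewrite | github.com/yenhao123/zsim_ramulator | zsim-ramulator/shell/canny/tools/reformat_to_dramsys_form.py | convert_to_dramsysformat
-- ===== SOURCE A (Python) =====
-- BASE_ADDR = 536870912
--
-- def convert_to_dramsysformat(data_group, n_groups):
--     operation_map = {
--         "L" : "read",
--         "S" : "write",
--     }
--
--     new_data_group = []
--     for i in range(n_groups):
--         new_lines = []
--         prev_addr = 0
--         for j, line in enumerate(data_group[i]):
--             parts = line.split()
--             operation = operation_map[parts[3]]
--             ori_addr = int(parts[4])
--             offset = ori_addr - prev_addr
--             prev_addr = ori_addr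
--             if j == 0:
--                 continue
--             if abs(offset) > BASE_ADDR:
--                 addr = hex(BASE_ADDR * 2)
--             else:
--                 addr = hex(BASE_ADDR + offset)
--
--             new_line = "{}:\t{}\t{}\n".format(j, operation, addr)
--             new_lines.append(new_line)
--
--         new_data_group.append(new_lines)
--
--     return new_data_group
-- ===== SOURCE B (Python) =====
-- BASE_ADDR = 536870912
--
-- def _format_addr(offset):
--     if abs(offset) > BASE_ADDR:
--         return hex(BASE_ADDR * 2)
--     return hex(BASE_ADDR + offset)
--
-- def convert_to_dramsysformat(data_group, n_groups):
--     operation_map = {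
--         "L": "read",
--         "S": "write",
--     }
--     new_data_group = []
--     for i in range(n_groups):
--         parsed = []
--         for line in data_group[i]:
--             parts = line.split()
--             parsed.append((operation_map[parts[3]], int(parts[4])))
--         new_data_group.append([
--             "{}:\t{}\t{}\n".format(j, op, _format_addr(curr - prev))
--             for j, ((_, prev), (op, curr)) in enumerate(zip(parsed, parsed[1:]), start=1)
--         ])
--     return new_data_group
-- ===== Notes on version B (the rewrite author's own statement) =====
-- stated objective: alternative
-- what changed: B replaces A's single stateful inner loop that threads prev_addr through enumerate(lines) with a two-phase decomposition: first parse every line into (operation, address) pairs, then map the hex-offset formatter over adjacent pairs via zip(parsed, parsed[1:]) with a 1-based enumerate.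
import Mathlib
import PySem

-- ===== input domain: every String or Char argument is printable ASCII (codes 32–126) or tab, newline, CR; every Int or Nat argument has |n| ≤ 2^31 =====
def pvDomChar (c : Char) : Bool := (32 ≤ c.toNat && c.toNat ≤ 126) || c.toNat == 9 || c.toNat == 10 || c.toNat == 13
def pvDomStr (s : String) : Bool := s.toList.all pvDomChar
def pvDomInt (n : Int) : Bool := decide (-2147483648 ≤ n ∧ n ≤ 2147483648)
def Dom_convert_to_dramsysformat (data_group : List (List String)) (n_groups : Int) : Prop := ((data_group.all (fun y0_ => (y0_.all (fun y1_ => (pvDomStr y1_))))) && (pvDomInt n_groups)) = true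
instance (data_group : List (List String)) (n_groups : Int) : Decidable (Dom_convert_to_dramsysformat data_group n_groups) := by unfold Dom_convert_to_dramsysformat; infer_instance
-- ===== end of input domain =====

-- B restructures A's single stateful inner loop (prev_addr threaded through enumerate) into
-- parse-all-lines first, then map over adjacent pairs (zip parsed parsed[1:]); objective: alternative decomposition, same cost.

-- Shared port of the Python builtin hex(n): exact for every Int (lowercase digits, 0x prefix, '-' for negatives).
def pvHexDigit (n : Nat) : Char := if n < 10 then Char.ofNat (48 + n) else Char.ofNat (87 + n)

def pvHexCharsAux : Nat → Nat → List Char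
  | _, 0 => []
  | 0, _ + 1 => []
  | fuel + 1, n + 1 => pvHexCharsAux fuel ((n + 1) / 16) ++ [pvHexDigit ((n + 1) % 16)]

def pvHexChars (n : Nat) : List Char := pvHexCharsAux n n

def pvHex (n : Int) : String :=
  if n = 0 then "0x0"
  else if n < 0 then String.ofList ('-' :: '0' :: 'x' :: pvHexChars n.natAbs)
  else String.ofList ('0' :: 'x' :: pvHexChars n.natAbs)

-- the literal dict operation_map = {"L": "read", "S": "write"} (both Pythons define it verbatim)
def pvOpMap : PySem.Dict String String := PySem.Dict.ofList [("L", "read"), ("S", "write")]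

-- ===== PORT A =====
-- A-side helper: the body of A's inner `for j, line in enumerate(...)` loop, state = (new_lines, prev_addr)
def pvStepA (st : List String × Int) (jl : Int × String) : List String × Int :=
  let parts := PySem.Str.split₀ jl.2
  let operation := (PySem.Dict.get? pvOpMap ((PySem.List.pyGet? parts 3).getD "")).getD ""
  let ori_addr := (PySem.Int.ofStr? ((PySem.List.pyGet? parts 4).getD "")).getD 0
  let offset := ori_addr - st.2
  if jl.1 == 0 then (st.1, ori_addr)
  else
    let addr := if 536870912 < offset.natAbs then pvHex (536870912 * 2) else pvHex (536870912 + offset)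
    (st.1 ++ [PySem.Int.toStr jl.1 ++ ":\t" ++ operation ++ "\t" ++ addr ++ "\n"], ori_addr)

def convert_to_dramsysformat (data_group : List (List String)) (n_groups : Int) : List (List String) :=
  (PySem.List.pyRange 0 n_groups 1).foldl
    (fun new_data_group i =>
      new_data_group ++
        [((PySem.List.enumerate ((PySem.List.pyGet? data_group i).getD []) 0).foldl pvStepA ([], 0)).1])
    []

-- ===== PORT B =====
-- B-side helpers: _format_addr, the per-line parser, and the per-pair formatter
def pvFormatAddr (offset : Int) : String :=
  if 536870912 < offset.natAbs then pvHex (536870912 * 2) else pvHex (536870912 + offset)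

def pvParseB (line : String) : String × Int :=
  let parts := PySem.Str.split₀ line
  ((PySem.Dict.get? pvOpMap ((PySem.List.pyGet? parts 3).getD "")).getD "",
   (PySem.Int.ofStr? ((PySem.List.pyGet? parts 4).getD "")).getD 0)

def pvLineB (jp : Int × ((String × Int) × (String × Int))) : String :=
  PySem.Int.toStr jp.1 ++ ":\t" ++ jp.2.2.1 ++ "\t" ++ pvFormatAddr (jp.2.2.2 - jp.2.1.2) ++ "\n"

def convert_to_dramsysformat_alt (data_group : List (List String)) (n_groups : Int) : List (List String) :=
  (PySem.List.pyRange 0 n_groups 1).foldl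
    (fun acc i =>
      let parsed := ((PySem.List.pyGet? data_group i).getD []).map pvParseB
      acc ++ [(PySem.List.enumerate (parsed.zip (parsed.drop 1)) 1).map pvLineB])
    []

-- ===== PRECONDITION & SPEC =====
-- Pre_ excludes exactly the inputs on which the Python A raises: n_groups beyond the list
-- (IndexError) or some processed line whose split has < 5 fields (IndexError), whose field 3
-- is not "L"/"S" (KeyError), or whose field 4 is not an int literal (ValueError).
def pvLineOK (line : String) : Bool :=
  let parts := PySem.Str.split₀ line
  decide (4 < parts.length) &&
    ((parts.getD 3 "") == "L" || (parts.getD 3 "") == "S") &&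
    (PySem.Int.ofStr? (parts.getD 4 "")).isSome

def Pre_convert_to_dramsysformat (data_group : List (List String)) (n_groups : Int) : Prop :=
  n_groups ≤ data_group.length ∧
    ((data_group.take n_groups.toNat).all (fun g => g.all pvLineOK)) = true

instance (data_group : List (List String)) (n_groups : Int) : Decidable (Pre_convert_to_dramsysformat data_group n_groups) := by
  unfold Pre_convert_to_dramsysformat; infer_instance

def pvWitness_convert_to_dramsysformat : List (List String) × Int :=
  ([["a b c L 0", "a b c S 16", "a b c L 8"]], 1)

def Spec_convert_to_dramsysformat (data_group : List (List String)) (n_groups : Int) (out : List (List String)) : Prop := out = convert_to_dramsysformat_alt data_group n_groups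
instance (data_group : List (List String)) (n_groups : Int) (out : List (List String)) : Decidable (Spec_convert_to_dramsysformat data_group n_groups out) := by unfold Spec_convert_to_dramsysformat; infer_instance

-- ===== CLAIM (what is proved, stated in full; the proofs are below) =====
def Claim_equal_convert_to_dramsysformat : Prop := ∀ (data_group : List (List String)) (n_groups : Int), Dom_convert_to_dramsysformat data_group n_groups → Pre_convert_to_dramsysformat data_group n_groups → Spec_convert_to_dramsysformat data_group n_groups (convert_to_dramsysformat data_group n_groups)

-- ===== LEMMAS AND PROOFS =====

-- common description of the emitted lines of one group, indexed from k, given the parsed tail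
def pvEmit : Int → Int → List (String × Int) → List String
  | _, _, [] => []
  | k, prev, p :: ps =>
      (PySem.Int.toStr k ++ ":\t" ++ p.1 ++ "\t" ++ pvFormatAddr (p.2 - prev) ++ "\n") :: pvEmit (k + 1) p.2 ps

set_option maxHeartbeats 1600000 in
lemma auxA (lines : List String) : ∀ (k : Int), 0 < k → ∀ (acc : List String) (prev : Int),
    ((PySem.List.enumerate lines k).foldl pvStepA (acc, prev)).1
      = acc ++ pvEmit k prev (lines.map pvParseB) := by
  induction lines with
  | nil => intro k _ acc prev; simp [PySem.List.enumerate_nil, pvEmit]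
  | cons l rest ih =>
    intro k hk acc prev
    have hne : (k == 0) = false := by simp; omega
    rw [PySem.List.enumerate_cons]
    simp only [List.foldl_cons]
    have hstep : pvStepA (acc, prev) (k, l)
        = (acc ++ [PySem.Int.toStr k ++ ":\t" ++ (pvParseB l).1 ++ "\t"
            ++ pvFormatAddr ((pvParseB l).2 - prev) ++ "\n"], (pvParseB l).2) := by
      unfold pvStepA
      simp only [hne]
      rw [if_neg (by simp)]
      simp only [pvFormatAddr]
      simp only [pvParseB]
    rw [hstep, ih (k + 1) (by omega)]
    simp [pvEmit, List.append_assoc]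

lemma auxB (ps : List (String × Int)) : ∀ (p0 : String × Int) (k : Int),
    (PySem.List.enumerate ((p0 :: ps).zip ps) k).map pvLineB = pvEmit k p0.2 ps := by
  induction ps with
  | nil => intro p0 k; simp [PySem.List.enumerate_nil, pvEmit]
  | cons p1 ps' ih =>
    intro p0 k
    simp only [List.zip_cons_cons, PySem.List.enumerate_cons, List.map_cons, ih p1 (k + 1)]
    simp [pvLineB, pvEmit]

set_option maxHeartbeats 1600000 in
lemma group_eq (lines : List String) :
    ((PySem.List.enumerate lines 0).foldl pvStepA ([], 0)).1
      = (PySem.List.enumerate (((lines.map pvParseB).zip ((lines.map pvParseB).drop 1))) 1).map pvLineB := by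
  cases lines with
  | nil => simp [PySem.List.enumerate_nil]
  | cons l0 rest =>
    rw [PySem.List.enumerate_cons]
    simp only [List.foldl_cons]
    have hstep : pvStepA (([] : List String), (0 : Int)) ((0 : Int), l0) = ([], (pvParseB l0).2) := by
      rfl
    rw [hstep]
    norm_num
    rw [auxA rest 1 (by omega) [] (pvParseB l0).2]
    rw [List.nil_append]
    exact (auxB (rest.map pvParseB) (pvParseB l0) 1).symm

-- ===== VERDICT (by name: the statement is the Claim_ definition above) =====
theorem convert_to_dramsysformat_spec : Claim_equal_convert_to_dramsysformat := by
  intro data_group n_groups _ _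
  unfold Spec_convert_to_dramsysformat convert_to_dramsysformat convert_to_dramsysformat_alt
  apply PySem.List.foldl_congr_mem
  intro acc i _
  rw [group_eq]
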